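-- pv_equiv track=rewrite | github.com/Merck/PepSeA | alignment/AlignSubPeptides.py | fasta2helm
-- ===== SOURCE A (Python) =====
-- def fasta2helm(fasta_seq):
--     """Converts multi-line FASTA format into HELM strings"""
--     helm = ''
--     nnAA = False
--     amino_symbol = ''
--     for el in fasta_seq:
--         if len(helm) > 0 and not nnAA:
--             helm += "."
--
--         if el == "[":
--             amino_symbol += el
--             nnAA = True
--         elif el == "]":
--             amino_symbol += el
--             helm += amino_symbol
--             nnAA = False
--             amino_symbol = ''
--         elif nnAA:
--             amino_symbol += el
--         else:
--             helm += el
--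
--     # Check that all the nnAAs were processed correctly - all the squared brackets in the input sequence are paired
--     assert not nnAA, f"Non-valid notation of non-natural amino acids in the following sequence {fasta_seq}"
--
--     return helm
-- ===== SOURCE B (Python) =====
-- import re
--
-- def fasta2helm(fasta_seq):
--     """Converts multi-line FASTA format into HELM strings"""
--     tokens = re.findall(r'\[[^\]]*\]|[\s\S]', fasta_seq)
--     # an unclosed opening bracket degrades to a lone single-char token
--     assert '[' not in tokens  # lone opening-bracket token, f"Non-valid notation of non-natural amino acids in the following sequence {fasta_seq}"
--     return '.'.join(tokens)
-- ===== Notes on version B (the rewrite author's own statement) =====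
-- stated objective: idiomatic
-- what changed: Replaces the per-character state machine with three accumulators by a single regex findall that tokenizes the sequence into bracketed groups and single characters, then joins the tokens with dots; the assertion on an unclosed bracket is kept as a check that no token is a lone opening bracket.
import Mathlib
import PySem

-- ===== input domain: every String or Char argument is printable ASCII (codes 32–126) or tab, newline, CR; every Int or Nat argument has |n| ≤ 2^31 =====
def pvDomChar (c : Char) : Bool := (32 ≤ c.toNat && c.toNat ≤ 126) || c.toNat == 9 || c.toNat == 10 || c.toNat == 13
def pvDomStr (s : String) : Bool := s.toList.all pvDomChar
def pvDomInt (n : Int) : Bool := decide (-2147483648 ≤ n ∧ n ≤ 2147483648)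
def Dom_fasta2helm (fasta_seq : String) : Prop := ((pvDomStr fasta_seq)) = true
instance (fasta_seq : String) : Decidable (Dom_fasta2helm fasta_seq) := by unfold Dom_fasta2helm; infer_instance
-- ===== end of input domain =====

-- B replaces A's per-character state machine by a regex-style tokenize-then-join pass (idiomatic, same cost).

-- ===== PORT A =====
-- one iteration of A's for-loop; state = (helm, nnAA, amino_symbol)
def pvStepA (st : List Char × Bool × List Char) (c : Char) : List Char × Bool × List Char :=
  let h := if st.1 ≠ [] ∧ st.2.1 = false then st.1 ++ ['.'] else st.1
  if c = '[' then (h, true, st.2.2 ++ ['['])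
  else if c = ']' then (h ++ st.2.2 ++ [']'], false, [])
  else if st.2.1 then (h, true, st.2.2 ++ [c])
  else (h ++ [c], false, [])

-- A's trailing assert raises exactly outside Pre_fasta2helm; the port returns helm there (unclaimed)
def fasta2helm (fasta_seq : String) : String :=
  String.mk (fasta_seq.toList.foldl pvStepA ([], false, [])).1

-- ===== PORT B =====
-- hand tokenizer for B's regex findall: a full bracketed group if one closes, else one char
def pvTokB : List Char → List (List Char)
  | [] => []
  | c :: rest =>
    if c = '[' ∧ ']' ∈ rest then
      ('[' :: rest.takeWhile (· ≠ ']') ++ [']']) :: pvTokB ((rest.dropWhile (· ≠ ']')).tail)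
    else [c] :: pvTokB rest
termination_by l => l.length
decreasing_by
  · have h1 := List.length_dropWhile_le (fun x => decide (x ≠ ']')) rest
    simp only [List.length_tail, List.length_cons]
    omega
  · simp

-- B's assert fires exactly outside Pre_fasta2helm; the port returns the join there (unclaimed)
def fasta2helm_alt (fasta_seq : String) : String :=
  String.mk (List.intercalate ['.'] (pvTokB fasta_seq.toList))

-- ===== PRECONDITION & SPEC =====
-- Pre_ excludes exactly the inputs where A's assert raises AssertionError (an unclosed opening
-- bracket after the last closing bracket); B's assert raises on exactly the same inputs.
def Pre_fasta2helm (fasta_seq : String) : Prop :=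
  '[' ∉ fasta_seq.toList.reverse.takeWhile (· ≠ ']')
instance (fasta_seq : String) : Decidable (Pre_fasta2helm fasta_seq) := by
  unfold Pre_fasta2helm; infer_instance

def pvWitness_fasta2helm : String := "A[Bx]C"

def Spec_fasta2helm (fasta_seq : String) (out : String) : Prop := out = fasta2helm_alt fasta_seq
instance (fasta_seq : String) (out : String) : Decidable (Spec_fasta2helm fasta_seq out) := by unfold Spec_fasta2helm; infer_instance

-- ===== CLAIM (what is proved, stated in full; the proofs are below) =====
def Claim_equal_fasta2helm : Prop := ∀ (fasta_seq : String), Dom_fasta2helm fasta_seq → Pre_fasta2helm fasta_seq → Spec_fasta2helm fasta_seq (fasta2helm fasta_seq)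

-- ===== LEMMAS AND PROOFS =====

-- list-level form of Pre_
def pvPreL (l : List Char) : Prop := '[' ∉ l.reverse.takeWhile (· ≠ ']')

lemma pv_mem_takeWhile_app {p : Char → Bool} {a : Char} (x y : List Char)
    (h : a ∈ x.takeWhile p) : a ∈ (x ++ y).takeWhile p := by
  induction x with
  | nil => simp [List.takeWhile] at h
  | cons c x ih =>
    by_cases hc : p c
    · simp [hc] at h ⊢
      rcases h with h | h
      · exact Or.inl h
      · exact Or.inr (ih h)
    · simp [hc] at h

lemma pvPreL_tail {c : Char} {rest : List Char} (h : pvPreL (c :: rest)) : pvPreL rest := by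
  unfold pvPreL at *
  intro hm
  exact h (by simpa using pv_mem_takeWhile_app rest.reverse [c] hm)

lemma pvPreL_drop {x after : List Char} (h : pvPreL (x ++ ']' :: after)) : pvPreL after := by
  unfold pvPreL at *
  intro hm
  apply h
  rw [List.reverse_append, List.reverse_cons, List.append_assoc]
  exact pv_mem_takeWhile_app after.reverse (([']'] : List Char) ++ x.reverse) hm

lemma pvPreL_open {rest : List Char} (h : pvPreL ('[' :: rest)) : ']' ∈ rest := by
  by_contra hm
  apply h
  have hall : ∀ x ∈ ('[' :: rest).reverse, (fun a => decide ¬a = ']') x = true := by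
    intro x hx
    simp only [List.mem_reverse, List.mem_cons] at hx
    rcases hx with rfl | hx
    · decide
    · simp only [decide_eq_true_eq]
      intro h'; exact hm (h' ▸ hx)
  rw [List.takeWhile_eq_self_iff.2 hall]
  simp

lemma pvDropWhile_mem {rest : List Char} (h : ']' ∈ rest) :
    rest.dropWhile (· ≠ ']') = ']' :: (rest.dropWhile (· ≠ ']')).tail := by
  induction rest with
  | nil => simp at h
  | cons c rest ih =>
    by_cases hc : c = ']'
    · subst hc; simp
    · have hm : ']' ∈ rest := by
        rcases List.mem_cons.1 h with h' | h'
        · exact absurd h'.symm hc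
        · exact h'
      simp only [List.dropWhile_cons, decide_eq_true_eq]
      rw [if_pos hc]
      exact ih hm

lemma pvTokB_nil_iff (l : List Char) : pvTokB l = [] ↔ l = [] := by
  cases l with
  | nil => simp [pvTokB]
  | cons c rest =>
    constructor
    · intro h
      rw [pvTokB] at h
      split at h <;> simp at h
    · intro h; simp at h

lemma pvIntercalate_cons (s a : List Char) (l : List (List Char)) :
    List.intercalate s (a :: l) = a ++ if l = [] then [] else s ++ List.intercalate s l := by
  cases l with
  | nil => simp [List.intercalate]
  | cons b l => simp [List.intercalate, List.intersperse]

lemma pvFoldA_body (body : List Char) (hb : ∀ a ∈ body, a ≠ ']') (h a : List Char) :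
    List.foldl pvStepA (h, true, a) body = (h, true, a ++ body) := by
  induction body generalizing a with
  | nil => simp
  | cons c rest ih =>
    have hc : c ≠ ']' := hb c (by simp)
    have hstep : pvStepA (h, true, a) c = (h, true, a ++ [c]) := by
      by_cases h1 : c = '['
      · subst h1; simp [pvStepA]
      · simp [pvStepA, h1, hc]
    rw [List.foldl_cons, hstep, ih (fun x hx => hb x (by simp [hx]))]
    simp

lemma pvMainA : ∀ n (l : List Char), l.length ≤ n → pvPreL l → ∀ h : List Char,
    List.foldl pvStepA (h, false, ([] : List Char)) l
      = ((if h = [] then List.intercalate ['.'] (pvTokB l)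
          else if l = [] then h
          else h ++ '.' :: List.intercalate ['.'] (pvTokB l)), false, ([] : List Char)) := by
  intro n
  induction n with
  | zero =>
    intro l hlen _ h
    have : l = [] := List.length_eq_zero_iff.1 (Nat.le_zero.1 hlen)
    subst this
    simp [pvTokB, List.intercalate]
  | succ n ih =>
    intro l hlen hP h
    cases l with
    | nil => simp [pvTokB, List.intercalate]
    | cons c rest =>
      by_cases hc : c = '['
      · subst hc
        have hm : ']' ∈ rest := pvPreL_open hP
        set body := rest.takeWhile (· ≠ ']') with hbody
        set after := (rest.dropWhile (· ≠ ']')).tail with hafter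
        have hsplit : rest = body ++ ']' :: after := by
          conv_lhs => rw [← List.takeWhile_append_dropWhile (p := (· ≠ ']')) (l := rest)]
          rw [pvDropWhile_mem hm]
        have hbmem : ∀ a ∈ body, a ≠ ']' := by
          intro a ha
          have := List.mem_takeWhile_imp ha
          simpa using this
        have hPafter : pvPreL after :=
          pvPreL_drop (x := '[' :: body) (by rw [hsplit] at hP; simpa using hP)
        have hlen2 : after.length ≤ n := by
          rw [hsplit] at hlen; simp at hlen; omega
        -- evaluate A's loop over '[' :: body ++ ']' :: after
        have hstep1 : pvStepA (h, false, ([] : List Char)) '[' =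
            ((if h = [] then h else h ++ ['.']), true, ['[']) := by
          by_cases hh : h = []
          · simp [pvStepA, hh]
          · simp [pvStepA, hh]
        set h1 : List Char := if h = [] then h else h ++ ['.'] with hh1
        have hstep2 : pvStepA (h1, true, ('[' :: body : List Char)) ']' =
            (h1 ++ ('[' :: body) ++ [']'], false, []) := by
          simp [pvStepA]
        have hH : h1 ++ ('[' :: body) ++ [']'] ≠ [] := by simp
        calc List.foldl pvStepA (h, false, ([] : List Char)) ('[' :: rest)
            = List.foldl pvStepA ((if h = [] then h else h ++ ['.']), true, ['[']) rest := by
              rw [List.foldl_cons, hstep1]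
          _ = List.foldl pvStepA (h1 ++ ('[' :: body) ++ [']'], false, ([] : List Char)) after := by
              rw [hsplit, List.foldl_append, pvFoldA_body body hbmem h1 ['['],
                List.foldl_cons]
              simp only [List.singleton_append, hstep2]
          _ = _ := by
              rw [ih after hlen2 hPafter _]
              have htok : pvTokB ('[' :: rest) =
                  ('[' :: body ++ [']']) :: pvTokB after := by
                rw [pvTokB, if_pos ⟨rfl, hm⟩]
              rw [htok, pvIntercalate_cons]
              rw [if_neg hH]
              by_cases ha : after = []
              · rw [if_pos ha, if_pos ((pvTokB_nil_iff after).2 ha)]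
                by_cases hh : h = [] <;>
                  simp [hh, hh1, List.append_assoc]
              · rw [if_neg ha, if_neg (fun hx => ha ((pvTokB_nil_iff after).1 hx))]
                by_cases hh : h = [] <;>
                  simp [hh, hh1, List.append_assoc]
      · -- c is an ordinary character (possibly ']'): one token [c]
        have hstep : pvStepA (h, false, ([] : List Char)) c =
            ((if h = [] then h else h ++ ['.']) ++ [c], false, []) := by
          by_cases hj : c = ']'
          · subst hj
            by_cases hh : h = [] <;> simp [pvStepA, hh]
          · by_cases hh : h = [] <;> simp [pvStepA, hh, hc, hj]
        have hPrest : pvPreL rest := pvPreL_tail hP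
        have hlen2 : rest.length ≤ n := by simp at hlen; omega
        have hne : (if h = [] then h else h ++ ['.']) ++ [c] ≠ [] := by
          by_cases hh : h = [] <;> simp [hh]
        rw [List.foldl_cons, hstep, ih rest hlen2 hPrest _]
        have htok : pvTokB (c :: rest) = [c] :: pvTokB rest := by
          rw [pvTokB, if_neg (fun hx => hc hx.1)]
        rw [htok, pvIntercalate_cons, if_neg hne]
        by_cases hr : rest = []
        · rw [if_pos hr, if_pos ((pvTokB_nil_iff rest).2 hr)]
          by_cases hh : h = [] <;> simp [hh]
        · rw [if_neg hr, if_neg (fun hx => hr ((pvTokB_nil_iff rest).1 hx))]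
          by_cases hh : h = [] <;> simp [hh]

-- ===== VERDICT (by name: the statement is the Claim_ definition above) =====
theorem fasta2helm_spec : Claim_equal_fasta2helm := by
  intro s _ hPre
  unfold Spec_fasta2helm fasta2helm fasta2helm_alt
  rw [pvMainA s.toList.length s.toList le_rfl hPre []]
  simp
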